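-- pv_equiv track=rewrite | github.com/midnightbot/leetcode_solutions | python3_solution_set2/1580. Put Boxes Into the Warehouse II.py | maxBoxesInWarehouse
-- ===== SOURCE A (Python) =====
-- from typing import List
--
-- def maxBoxesInWarehouse(boxes: List[int], warehouse: List[int]) -> int:
--
--     ## simple greedy iteration
--     n= len(warehouse)
--     low = 0
--     high = n-1
--
--     boxes = sorted(boxes, reverse = True)
--     ans = 0
--     for x in range(len(boxes)):
--         if low <= high:
--             if boxes[x] <= warehouse[low]:
--                 low+=1
--                 ans+=1
--
--             elif boxes[x] <= warehouse[high]: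
--                 high-=1
--                 ans+=1
--
--     return ans
-- ===== SOURCE B (Python) =====
-- from typing import List
--
-- def maxBoxesInWarehouse(boxes: List[int], warehouse: List[int]) -> int:
--     # running minima from the left: effective height reachable from the left end
--     left = []
--     for h in warehouse:
--         left.append(h if not left else min(left[-1], h))
--     # running minima from the right: effective height reachable from the right end
--     right = []
--     for h in reversed(warehouse):
--         right.append(h if not right else min(right[-1], h))
--     right.reverse()
--     # each room's capacity is the better of the two sides; match greedily, largest first
--     caps = sorted((max(a, b) for a, b in zip(left, right)), reverse=True)
--     bs = sorted(boxes, reverse=True)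
--     count = 0
--     j = 0
--     for b in bs:
--         if j < len(caps) and b <= caps[j]:
--             count += 1
--             j += 1
--     return count
-- ===== Notes on version B (the rewrite author's own statement) =====
-- stated objective: alternative
-- what changed: A runs a two-end pointer scan over the raw warehouse; B first materialises each room's effective capacity as max(prefix-min, suffix-min), sorts the capacities descending and greedily matches the descending-sorted boxes against them with a single pointer.
import Mathlib
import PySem

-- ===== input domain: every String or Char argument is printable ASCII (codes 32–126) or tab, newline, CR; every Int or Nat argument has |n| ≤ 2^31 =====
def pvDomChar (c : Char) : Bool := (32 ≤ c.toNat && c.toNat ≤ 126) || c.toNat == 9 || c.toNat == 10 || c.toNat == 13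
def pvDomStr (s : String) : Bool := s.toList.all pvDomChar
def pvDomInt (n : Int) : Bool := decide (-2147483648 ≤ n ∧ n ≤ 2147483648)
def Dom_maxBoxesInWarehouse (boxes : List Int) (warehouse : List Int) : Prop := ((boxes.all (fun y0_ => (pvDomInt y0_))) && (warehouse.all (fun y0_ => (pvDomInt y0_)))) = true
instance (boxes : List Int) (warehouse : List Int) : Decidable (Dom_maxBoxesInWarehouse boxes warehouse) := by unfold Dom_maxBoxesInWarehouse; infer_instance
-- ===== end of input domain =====

-- B replaces A's two-end pointer scan by an explicit capacity table (max of prefix/suffix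
-- minima per room) sorted descending and a single-pointer greedy match (objective: alternative).

-- ===== PORT A =====
def pvAStep (warehouse : List Int) (st : Int × Int × Int) (b : Int) : Int × Int × Int :=
  if st.1 ≤ st.2.1 then
    if b ≤ PySem.List.pyGetD warehouse st.1 0 then (st.1 + 1, st.2.1, st.2.2 + 1)
    else if b ≤ PySem.List.pyGetD warehouse st.2.1 0 then (st.1, st.2.1 - 1, st.2.2 + 1)
    else st
  else st

def maxBoxesInWarehouse (boxes : List Int) (warehouse : List Int) : Int :=
  let n : Int := (warehouse.length : Int)
  let boxes' := PySem.List.sorted boxes (fun x => x) true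
  (boxes'.foldl (pvAStep warehouse) (0, n - 1, 0)).2.2

-- ===== PORT B =====
-- running minima from the left (python: left.append(h if not left else min(left[-1], h)))
def pvPrefGo (m : Int) : List Int → List Int
  | [] => []
  | h :: t => (min m h) :: pvPrefGo (min m h) t

def pvPref : List Int → List Int
  | [] => []
  | h :: t => h :: pvPrefGo h t

-- running minima scanning reversed(warehouse), then reversed back
def pvSuf (w : List Int) : List Int := (pvPref w.reverse).reverse

-- capacities: the better of the two sides, per room
def pvCaps (w : List Int) : List Int := List.zipWith max (pvPref w) (pvSuf w)

def pvBStep (caps : List Int) (st : Int × Int) (b : Int) : Int × Int :=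
  if st.2 < (caps.length : Int) ∧ b ≤ PySem.List.pyGetD caps st.2 0 then (st.1 + 1, st.2 + 1)
  else st

def maxBoxesInWarehouse_alt (boxes : List Int) (warehouse : List Int) : Int :=
  let caps := PySem.List.sorted (pvCaps warehouse) (fun x => x) true
  let bs := PySem.List.sorted boxes (fun x => x) true
  (bs.foldl (pvBStep caps) (0, 0)).1

-- ===== PRECONDITION & SPEC =====
def Spec_maxBoxesInWarehouse (boxes : List Int) (warehouse : List Int) (out : Int) : Prop := out = maxBoxesInWarehouse_alt boxes warehouse
instance (boxes : List Int) (warehouse : List Int) (out : Int) : Decidable (Spec_maxBoxesInWarehouse boxes warehouse out) := by unfold Spec_maxBoxesInWarehouse; infer_instance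

-- ===== CLAIM (what is proved, stated in full; the proofs are below) =====
def Claim_equal_maxBoxesInWarehouse : Prop := ∀ (boxes : List Int) (warehouse : List Int), Dom_maxBoxesInWarehouse boxes warehouse → Spec_maxBoxesInWarehouse boxes warehouse (maxBoxesInWarehouse boxes warehouse)

-- ===== LEMMAS AND PROOFS =====

-- abstract model of A's loop: two-ended consumption of the current warehouse segment
def pvF : List Int → List Int → Int
  | [], _ => 0
  | _ :: _, [] => 0
  | b :: bs, c :: cs =>
    if b ≤ c then 1 + pvF bs cs
    else if b ≤ cs.getLastD c then 1 + pvF bs (c :: cs).dropLast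
    else pvF bs (c :: cs)

-- abstract model of B's loop: greedy match of descending boxes against descending caps
def pvG : List Int → List Int → Int
  | [], _ => 0
  | _ :: bs, [] => pvG bs []
  | b :: bs, c :: cs => if b ≤ c then 1 + pvG bs cs else pvG bs (c :: cs)

def pvSort (l : List Int) : List Int := PySem.List.sorted l (fun x => x) true

lemma pvG_nil (bs : List Int) : pvG bs [] = 0 := by
  induction bs with
  | nil => rfl
  | cons b bs ih => simpa [pvG] using ih

lemma pvF_nil (bs : List Int) : pvF bs [] = 0 := by cases bs <;> rfl

lemma pvGetLast (wt : List Int) : ∀ (w0 : Int) (h : (w0 :: wt) ≠ []),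
    (w0 :: wt).getLast h = wt.getLastD w0 := by
  induction wt with
  | nil => intro w0 h; rfl
  | cons a t ih => intro w0 h; rw [List.getLast_cons (by simp), ih a (by simp), List.getLastD_cons]

-- canonical form: any ≥-sorted rearrangement IS the descending sort
lemma pvSort_canon {l m : List Int} (hp : m.Perm l) (hs : m.Pairwise (fun a b => b ≤ a)) :
    pvSort l = m := by
  refine List.Perm.eq_of_pairwise (le := fun a b => b ≤ a)
    (fun a b _ _ h1 h2 => le_antisymm h2 h1)
    (PySem.List.sorted_pairwise_rev l (fun x => x)) hs
    ((PySem.List.sorted_perm l (fun x => x) true).trans hp.symm)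

lemma pvSort_perm (l : List Int) : (pvSort l).Perm l :=
  PySem.List.sorted_perm l (fun x => x) true

lemma pvSort_pairwise (l : List Int) : (pvSort l).Pairwise (fun a b => b ≤ a) :=
  PySem.List.sorted_pairwise_rev l (fun x => x)

lemma pvSort_congr_perm {l l' : List Int} (h : l.Perm l') : pvSort l = pvSort l' :=
  pvSort_canon ((pvSort_perm l').trans h.symm) (pvSort_pairwise l')

lemma pvSort_cons_top {a : Int} {l : List Int} (h : ∀ x ∈ l, x ≤ a) :
    pvSort (a :: l) = a :: pvSort l := by
  refine pvSort_canon ((pvSort_perm l).cons a) ?_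
  refine List.pairwise_cons.2 ⟨?_, pvSort_pairwise l⟩
  intro x hx
  exact h x ((pvSort_perm l).mem_iff.1 hx)

lemma pvSort_map_min (t : Int) (l : List Int) :
    pvSort (l.map (fun c => min t c)) = (pvSort l).map (fun c => min t c) := by
  refine pvSort_canon ((pvSort_perm l).map _) ?_
  rw [List.pairwise_map]
  refine (pvSort_pairwise l).imp ?_
  intro a b hab
  omega

-- capping the caps at a bound t ≥ every box does not change the greedy count
lemma pvG_cap (t : Int) (bs : List Int) (hb : ∀ x ∈ bs, x ≤ t) :
    ∀ C : List Int, pvG bs C = pvG bs (C.map (fun c => min t c)) := by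
  induction bs with
  | nil => intro C; rfl
  | cons b bs ih =>
    intro C
    have hbt : b ≤ t := hb b (by simp)
    have hb' : ∀ x ∈ bs, x ≤ t := fun x hx => hb x (by simp [hx])
    cases C with
    | nil => simp [pvG]
    | cons c cs =>
      by_cases h : b ≤ c
      · have h2 : b ≤ min t c := by omega
        simp only [List.map_cons, pvG, if_pos h, if_pos h2, ih hb' cs]
      · have h2 : ¬ b ≤ min t c := by omega
        simpa only [List.map_cons, pvG, if_neg h, if_neg h2] using ih hb' (c :: cs)

-- shape lemmas about the capacity table
lemma pvPrefGo_eq (m : Int) (t : List Int) :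
    pvPrefGo m t = (pvPref t).map (fun x => min m x) := by
  induction t generalizing m with
  | nil => rfl
  | cons h t ih =>
    show (min m h) :: pvPrefGo (min m h) t
        = (fun x => min m x) h :: (pvPrefGo h t).map (fun x => min m x)
    rw [ih (min m h), ih h, List.map_map]
    refine congrArg₂ _ rfl ?_
    refine congrArg (fun f => (pvPref t).map f) ?_
    funext x
    simp only [Function.comp]
    omega

lemma pvPref_cons (w0 : Int) (wt : List Int) :
    pvPref (w0 :: wt) = w0 :: (pvPref wt).map (fun x => min w0 x) := by
  show w0 :: pvPrefGo w0 wt = _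
  rw [pvPrefGo_eq]

lemma length_pvPref (w : List Int) : (pvPref w).length = w.length := by
  induction w with
  | nil => rfl
  | cons h t ih => simp [pvPref_cons, ih]

lemma length_pvSuf (w : List Int) : (pvSuf w).length = w.length := by
  simp [pvSuf, length_pvPref]

lemma length_pvCaps (w : List Int) : (pvCaps w).length = w.length := by
  simp [pvCaps, length_pvPref, length_pvSuf]

lemma pvPrefGo_dropLast (x : Int) (l : List Int) :
    ∀ m, (pvPrefGo m (l ++ [x])).dropLast = pvPrefGo m l := by
  induction l with
  | nil => intro m; rfl
  | cons h t ih =>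
    intro m
    have hne : pvPrefGo (min m h) (t ++ [x]) ≠ [] := by
      cases t <;> simp [pvPrefGo]
    show ((min m h) :: pvPrefGo (min m h) (t ++ [x])).dropLast = (min m h) :: pvPrefGo (min m h) t
    rw [List.dropLast_cons_of_ne_nil hne, ih]

lemma pvPref_dropLast (x : Int) (l : List Int) :
    (pvPref (l ++ [x])).dropLast = pvPref l := by
  cases l with
  | nil => rfl
  | cons h t =>
    have hne : pvPrefGo h (t ++ [x]) ≠ [] := by cases t <;> simp [pvPrefGo]
    show (h :: pvPrefGo h (t ++ [x])).dropLast = h :: pvPrefGo h t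
    rw [List.dropLast_cons_of_ne_nil hne, pvPrefGo_dropLast]

lemma pvSuf_tail (w0 : Int) (wt : List Int) : (pvSuf (w0 :: wt)).tail = pvSuf wt := by
  rw [pvSuf, pvSuf, List.reverse_cons, List.tail_reverse, pvPref_dropLast]

lemma pvSuf_cons (w0 : Int) (wt : List Int) :
    ∃ s0, pvSuf (w0 :: wt) = s0 :: pvSuf wt := by
  have hlen : (pvSuf (w0 :: wt)).length = wt.length + 1 := by simp [length_pvSuf]
  cases h : pvSuf (w0 :: wt) with
  | nil => rw [h] at hlen; simp at hlen
  | cons a l =>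
    refine ⟨a, ?_⟩
    have := pvSuf_tail w0 wt
    rw [h] at this
    simp only [List.tail_cons] at this
    rw [this]

lemma pvCaps_rev (w : List Int) : pvCaps w.reverse = (pvCaps w).reverse := by
  have hsuf : pvSuf w.reverse = (pvPref w).reverse := by simp [pvSuf]
  have hz : (List.zipWith max (pvPref w) (pvSuf w)).reverse
      = List.zipWith max (pvPref w).reverse (pvSuf w).reverse :=
    List.reverse_zipWith (by simp [length_pvPref, length_pvSuf])
  have hsuf2 : pvSuf w = (pvPref w.reverse).reverse := rfl
  rw [pvCaps, pvCaps, hz, hsuf, hsuf2, List.reverse_reverse]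
  exact List.zipWith_comm_of_comm (fun a b : Int => max_comm a b)

lemma mem_pvPref_le {x w0 : Int} {wt : List Int} (h : x ∈ pvPref (w0 :: wt)) : x ≤ w0 := by
  rw [pvPref_cons] at h
  rcases List.mem_cons.1 h with h | h
  · omega
  · rcases List.mem_map.1 h with ⟨y, _, rfl⟩; omega

lemma mem_zipWith_max {x : Int} : ∀ {A B : List Int}, x ∈ List.zipWith max A B →
    ∃ p ∈ A, ∃ s ∈ B, x = max p s := by
  intro A
  induction A with
  | nil => intro B h; simp at h
  | cons a A ih =>
    intro B h
    cases B with
    | nil => simp at h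
    | cons b B =>
      rcases List.mem_cons.1 h with h | h
      · exact ⟨a, by simp, b, by simp, h⟩
      · rcases ih h with ⟨p, hp, s, hs, rfl⟩
        exact ⟨p, by simp [hp], s, by simp [hs], rfl⟩

-- every capacity is at most max(first room, last room)
lemma mem_pvCaps_le {x w0 : Int} {wt : List Int} (h : x ∈ pvCaps (w0 :: wt)) :
    x ≤ max w0 (wt.getLastD w0) := by
  rcases mem_zipWith_max h with ⟨p, hp, s, hs, rfl⟩
  have hpw : p ≤ w0 := mem_pvPref_le hp
  have hsw : s ≤ wt.getLastD w0 := by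
    have hs' : s ∈ pvPref ((w0 :: wt).reverse) := by
      have : s ∈ (pvPref ((w0 :: wt).reverse)).reverse := hs
      exact List.mem_reverse.1 this
    have hrev : (w0 :: wt).reverse
        = (w0 :: wt).getLast (by simp) :: ((w0 :: wt).dropLast).reverse := by
      conv_lhs => rw [← List.dropLast_append_getLast (l := w0 :: wt) (by simp)]
      simp
    rw [hrev, pvGetLast] at hs'
    exact mem_pvPref_le hs'
  omega

-- the capped tail of caps(w0::wt) equals the capped caps(wt)  (given b1 ≤ w0)
lemma pvCaps_tail_cap {b1 w0 : Int} (hb : b1 ≤ w0) (wt : List Int) :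
    ((pvCaps (w0 :: wt)).tail).map (fun c => min b1 c)
      = (pvCaps wt).map (fun c => min b1 c) := by
  obtain ⟨s0, hS⟩ := pvSuf_cons w0 wt
  simp only [pvCaps, pvPref_cons, hS, List.zipWith_cons_cons, List.tail_cons,
    List.map_zipWith, List.zipWith_map_left]
  congr 1
  funext p s
  omega

lemma pvCaps_cons_shape (w0 : Int) (wt : List Int) :
    ∃ s0, pvCaps (w0 :: wt) = max w0 s0 :: (pvCaps (w0 :: wt)).tail := by
  obtain ⟨s0, hS⟩ := pvSuf_cons w0 wt
  refine ⟨s0, ?_⟩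
  conv_lhs => rw [pvCaps, pvPref_cons, hS, List.zipWith_cons_cons]
  rw [pvCaps, pvPref_cons, hS, List.zipWith_cons_cons, List.tail_cons]

-- KEY: the largest box goes through the first room
lemma pvKey {b1 : Int} {b' : List Int} (hb' : ∀ x ∈ b', x ≤ b1)
    {v0 : Int} (vt : List Int) (h0 : b1 ≤ v0) :
    pvG (b1 :: b') (pvSort (pvCaps (v0 :: vt))) = 1 + pvG b' (pvSort (pvCaps vt)) := by
  have hball : ∀ x ∈ b1 :: b', x ≤ b1 := by
    intro x hx
    rcases List.mem_cons.1 hx with rfl | hx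
    · exact le_refl _
    · exact hb' x hx
  obtain ⟨s0, hshape⟩ := pvCaps_cons_shape v0 vt
  rw [pvG_cap b1 _ hball (pvSort (pvCaps (v0 :: vt))), ← pvSort_map_min]
  have hlist : (pvCaps (v0 :: vt)).map (fun c => min b1 c)
      = b1 :: (pvCaps vt).map (fun c => min b1 c) := by
    conv_lhs => rw [hshape]
    rw [List.map_cons, pvCaps_tail_cap h0 vt]
    congr 1
    omega
  rw [hlist, pvSort_cons_top (by
    intro x hx
    rcases List.mem_map.1 hx with ⟨y, _, rfl⟩
    omega)]
  show (if b1 ≤ b1 then 1 + pvG b' (pvSort ((pvCaps vt).map (fun c => min b1 c))) else _) = _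
  rw [if_pos (le_refl b1), pvSort_map_min, ← pvG_cap b1 b' hb']

-- MAIN: A's two-ended greedy equals B's capacity-table greedy, for descending boxes
lemma pvMain : ∀ (bs : List Int), bs.Pairwise (fun a b => b ≤ a) →
    ∀ w : List Int, pvF bs w = pvG bs (pvSort (pvCaps w)) := by
  intro bs
  induction bs with
  | nil => intro _ w; rfl
  | cons b1 b' ih =>
    intro hbs w
    have hb' : ∀ x ∈ b', x ≤ b1 := (List.pairwise_cons.1 hbs).1
    have hp : b'.Pairwise (fun a b => b ≤ a) := (List.pairwise_cons.1 hbs).2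
    cases w with
    | nil =>
      have hnil : pvSort (pvCaps ([] : List Int)) = [] := pvSort_canon (by rfl) (by simp)
      rw [pvF_nil, hnil, pvG_nil]
    | cons w0 wt =>
      by_cases h1 : b1 ≤ w0
      · rw [show pvF (b1 :: b') (w0 :: wt) = 1 + pvF b' wt from by simp only [pvF]; rw [if_pos h1]]
        rw [pvKey hb' wt h1, ih hp wt]
      · by_cases h2 : b1 ≤ wt.getLastD w0
        · have hrev : (w0 :: wt).reverse
              = (wt.getLastD w0) :: ((w0 :: wt).dropLast).reverse := by
            conv_lhs => rw [← List.dropLast_append_getLast (l := w0 :: wt) (by simp)]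
            rw [pvGetLast]
            simp
          have hsortrev : pvSort (pvCaps (w0 :: wt)) = pvSort (pvCaps ((w0 :: wt).reverse)) := by
            rw [pvCaps_rev]
            exact (pvSort_congr_perm (List.reverse_perm _)).symm
          rw [show pvF (b1 :: b') (w0 :: wt) = 1 + pvF b' ((w0 :: wt).dropLast) from by
            simp only [pvF]; rw [if_neg h1, if_pos h2]]
          rw [hsortrev, hrev, pvKey hb' _ h2, pvCaps_rev ((w0 :: wt).dropLast),
            pvSort_congr_perm (List.reverse_perm _), ih hp]
        · have hne : pvCaps (w0 :: wt) ≠ [] := by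
            intro hc
            have := length_pvCaps (w0 :: wt)
            rw [hc] at this
            simp at this
          obtain ⟨c, rest, hs⟩ : ∃ c rest, pvSort (pvCaps (w0 :: wt)) = c :: rest := by
            cases hh : pvSort (pvCaps (w0 :: wt)) with
            | nil =>
              exfalso
              have hper := pvSort_perm (pvCaps (w0 :: wt))
              rw [hh] at hper
              exact hne hper.symm.eq_nil
            | cons c rest => exact ⟨c, rest, rfl⟩
          have hc_mem : c ∈ pvCaps (w0 :: wt) := by
            have hper := pvSort_perm (pvCaps (w0 :: wt))
            rw [hs] at hper
            exact hper.mem_iff.1 (by simp)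
          have hcb : ¬ b1 ≤ c := by
            have := mem_pvCaps_le hc_mem
            omega
          rw [show pvF (b1 :: b') (w0 :: wt) = pvF b' (w0 :: wt) from by simp only [pvF]; rw [if_neg h1, if_neg h2]]
          rw [hs, show pvG (b1 :: b') (c :: rest) = pvG b' (c :: rest) from by simp [pvG, hcb],
            ← hs, ih hp]

-- A's indexed loop computes pvF on the current segment
lemma pvALoop (w : List Int) :
    ∀ (bs : List Int) (lo hiN : Nat), hiN ≤ w.length → ∀ ans : Int,
      (bs.foldl (pvAStep w) ((lo : Int), (hiN : Int) - 1, ans)).2.2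
        = ans + pvF bs ((w.take hiN).drop lo) := by
  intro bs
  induction bs with
  | nil =>
    intro lo hiN h ans
    rw [List.foldl_nil, show pvF [] (List.drop lo (List.take hiN w)) = 0 from rfl]
    ring
  | cons b bs ih =>
    intro lo hiN hhi ans
    rw [List.foldl_cons]
    by_cases hlt : lo < hiN
    · have hlo : lo < w.length := lt_of_lt_of_le hlt hhi
      have hguard : ((lo : Int) ≤ (hiN : Int) - 1) := by omega
      have h1 : PySem.List.pyGetD w (lo : Int) 0 = w[lo] := by
        rw [PySem.List.pyGetD_natCast]
        exact List.getD_eq_getElem w 0 hlo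
      have hhm1 : ((hiN : Int) - 1) = ((hiN - 1 : Nat) : Int) := by omega
      have h2 : PySem.List.pyGetD w ((hiN : Int) - 1) 0 = w[hiN - 1] := by
        rw [hhm1, PySem.List.pyGetD_natCast]
        exact List.getD_eq_getElem w 0 (by omega)
      have hlen : ((w.take hiN).drop lo).length = hiN - lo := by
        simp
        omega
      obtain ⟨c, cs, hcs⟩ : ∃ c cs, (w.take hiN).drop lo = c :: cs := by
        cases hsg : (w.take hiN).drop lo with
        | nil => rw [hsg] at hlen; simp at hlen; omega
        | cons c cs => exact ⟨c, cs, rfl⟩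
      have hc : c = w[lo] := by
        have hpos : 0 < ((w.take hiN).drop lo).length := by omega
        have h0 : ((w.take hiN).drop lo)[0]'hpos = c := by
          simp only [hcs, List.getElem_cons_zero]
        have h0' : ((w.take hiN).drop lo)[0]'hpos = w[lo] := by
          rw [List.getElem_drop, List.getElem_take]
          simp
        rw [← h0, h0']
      have hlast : cs.getLastD c = w[hiN - 1] := by
        have hnn : (w.take hiN).drop lo ≠ [] := by rw [hcs]; simp
        have h3 : ((w.take hiN).drop lo).getLast hnn = w[hiN - 1] := by
          rw [List.getLast_eq_getElem, List.getElem_drop, List.getElem_take]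
          have he : lo + (((w.take hiN).drop lo).length - 1) = hiN - 1 := by omega
          simp only [he]
        have h4 : ((w.take hiN).drop lo).getLast? = some (w[hiN - 1]) := by
          rw [List.getLast?_eq_some_getLast hnn, h3]
        rw [hcs, List.getLast?_cons] at h4
        rw [List.getLastD_eq_getLast?]
        exact Option.some.inj h4
      have htail : cs = (w.take hiN).drop (lo + 1) := by
        have ht : ((w.take hiN).drop lo).tail = (w.take hiN).drop (lo + 1) := List.tail_drop
        rw [hcs] at ht
        simpa using ht
      have hdropLast : (c :: cs).dropLast = (w.take (hiN - 1)).drop lo := by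
        rw [← hcs]
        apply List.ext_getElem
        · simp
          omega
        · intro i hi1 hi2
          rw [List.getElem_dropLast, List.getElem_drop, List.getElem_take,
            List.getElem_drop, List.getElem_take]
      rw [hcs]
      by_cases hb1 : b ≤ w[lo]
      · have hstep : pvAStep w ((lo : Int), (hiN : Int) - 1, ans) b
            = (((lo + 1 : Nat) : Int), (hiN : Int) - 1, ans + 1) := by
          simp [pvAStep, hguard, h1, hb1]
        rw [hstep, ih (lo + 1) hiN hhi (ans + 1), ← htail]
        rw [show pvF (b :: bs) (c :: cs) = 1 + pvF bs cs from by simp only [pvF]; rw [if_pos (by rw [hc]; exact hb1)]]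
        ring
      · by_cases hb2 : b ≤ w[hiN - 1]
        · have hstep : pvAStep w ((lo : Int), (hiN : Int) - 1, ans) b
              = (((lo : Nat) : Int), ((hiN - 1 : Nat) : Int) - 1, ans + 1) := by
            simp [pvAStep, hguard, h1, hb1, h2, hb2]; omega
          rw [hstep, ih lo (hiN - 1) (by omega) (ans + 1), ← hdropLast]
          rw [show pvF (b :: bs) (c :: cs) = 1 + pvF bs (c :: cs).dropLast from by
            simp only [pvF]
            rw [if_neg (by rw [hc]; exact hb1), if_pos (by rw [hlast]; exact hb2)]]
          ring
        · have hstep : pvAStep w ((lo : Int), (hiN : Int) - 1, ans) b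
              = ((lo : Int), (hiN : Int) - 1, ans) := by
            simp [pvAStep, hguard, h1, hb1, h2, hb2]
          rw [hstep, ih lo hiN hhi ans]
          rw [show pvF (b :: bs) (c :: cs) = pvF bs (c :: cs) from by
            simp only [pvF]
            rw [if_neg (by rw [hc]; exact hb1), if_neg (by rw [hlast]; exact hb2)], hcs]
    · have hseg : (w.take hiN).drop lo = [] := by
        apply List.eq_nil_of_length_eq_zero
        simp
        omega
      have hguard : ¬ ((lo : Int) ≤ (hiN : Int) - 1) := by omega
      have hstep : pvAStep w ((lo : Int), (hiN : Int) - 1, ans) b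
          = ((lo : Int), (hiN : Int) - 1, ans) := by
        simp [pvAStep, hguard]
      rw [hstep, ih lo hiN hhi ans, hseg, pvF_nil, pvF_nil]

-- B's pointer loop computes pvG on the remaining caps
lemma pvBLoop (caps : List Int) :
    ∀ (bs : List Int) (cnt : Int) (j : Nat), j ≤ caps.length →
      (bs.foldl (pvBStep caps) (cnt, (j : Int))).1 = cnt + pvG bs (caps.drop j) := by
  intro bs
  induction bs with
  | nil =>
    intro cnt j h
    rw [List.foldl_nil, show pvG [] (List.drop j caps) = 0 from rfl]
    ring
  | cons b bs ih =>
    intro cnt j hj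
    rw [List.foldl_cons]
    by_cases hlt : j < caps.length
    · have hget : PySem.List.pyGetD caps (j : Int) 0 = caps[j] := by
        rw [PySem.List.pyGetD_natCast]
        exact List.getD_eq_getElem caps 0 hlt
      have hdrop : caps.drop j = caps[j] :: caps.drop (j + 1) := by
        rw [List.drop_eq_getElem_cons hlt]
      by_cases hb : b ≤ caps[j]
      · have hstep : pvBStep caps (cnt, (j : Int)) b = (cnt + 1, ((j + 1 : Nat) : Int)) := by
          simp [pvBStep, hget, hb, hlt]
        rw [hstep, ih (cnt + 1) (j + 1) (by omega), hdrop]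
        rw [show pvG (b :: bs) (caps[j] :: caps.drop (j + 1))
            = 1 + pvG bs (caps.drop (j + 1)) from by simp [pvG, hb]]
        ring
      · have hstep : pvBStep caps (cnt, (j : Int)) b = (cnt, (j : Int)) := by
          simp [pvBStep, hget, hb]
        rw [hstep, ih cnt j hj, hdrop]
        rw [show pvG (b :: bs) (caps[j] :: caps.drop (j + 1))
            = pvG bs (caps[j] :: caps.drop (j + 1)) from by simp [pvG, hb]]
    · have hj' : j = caps.length := by omega
      have hdrop : caps.drop j = [] := by rw [hj']; simp
      have hstep : pvBStep caps (cnt, (j : Int)) b = (cnt, (j : Int)) := by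
        simp only [pvBStep]
        rw [if_neg (by intro hcon; omega)]
      rw [hstep, ih cnt j hj, hdrop, pvG_nil, pvG_nil]

lemma pvA_eq (boxes warehouse : List Int) :
    maxBoxesInWarehouse boxes warehouse = pvF (pvSort boxes) warehouse := by
  show ((PySem.List.sorted boxes (fun x => x) true).foldl (pvAStep warehouse)
      (0, (warehouse.length : Int) - 1, 0)).2.2 = _
  have h := pvALoop warehouse (PySem.List.sorted boxes (fun x => x) true) 0 warehouse.length
    le_rfl 0
  simp only [Nat.cast_zero, List.take_length, List.drop_zero, zero_add] at h
  exact h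

lemma pvB_eq (boxes warehouse : List Int) :
    maxBoxesInWarehouse_alt boxes warehouse = pvG (pvSort boxes) (pvSort (pvCaps warehouse)) := by
  show ((PySem.List.sorted boxes (fun x => x) true).foldl
      (pvBStep (PySem.List.sorted (pvCaps warehouse) (fun x => x) true)) (0, 0)).1 = _
  have h := pvBLoop (PySem.List.sorted (pvCaps warehouse) (fun x => x) true)
    (PySem.List.sorted boxes (fun x => x) true) 0 0 (Nat.zero_le _)
  simp only [Nat.cast_zero, List.drop_zero, zero_add] at h
  exact h

-- ===== VERDICT (by name: the statement is the Claim_ definition above) =====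
theorem maxBoxesInWarehouse_spec : Claim_equal_maxBoxesInWarehouse := by
  intro boxes warehouse _
  unfold Spec_maxBoxesInWarehouse
  rw [pvA_eq, pvB_eq]
  exact pvMain (pvSort boxes) (pvSort_pairwise boxes) warehouse
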